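-- pv_equiv track=rewrite | github.com/nadavcohen98/3D-data-SAM | code_with_debugs.py | _select_diverse_points
-- ===== SOURCE A (Python) =====
-- def _select_diverse_points(x_coords, y_coords, num_points, min_distance):
--     """
--     Select a diverse set of points ensuring that each selected point is at least
--     min_distance away from the others.
--     """
--     if len(x_coords) <= num_points:
--         return list(range(len(x_coords)))
--
--     selected_indices = [len(x_coords) - 1]  # Start with the highest confidence point
--
--     while len(selected_indices) < num_points:
--         max_min_dist = -1
--         best_idx = None
--         for i in range(len(x_coords)):
--             if i in selected_indices:
--                 continue
--             # Calculate minimum distance from i to already selected points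
--             dists = [((x_coords[i] - x_coords[j])**2 + (y_coords[i] - y_coords[j])**2) for j in selected_indices]
--             min_dist = min(dists)
--             if min_dist > max_min_dist:
--                 max_min_dist = min_dist
--                 best_idx = i
--         if best_idx is not None and max_min_dist >= min_distance**2:
--             selected_indices.append(best_idx)
--         else:
--             break
--     return selected_indices
-- ===== SOURCE B (Python) =====
-- def _select_diverse_points(x_coords, y_coords, num_points, min_distance):
--     n = len(x_coords)
--     if n <= num_points:
--         return list(range(n))
--     last = n - 1
--     selected = [last]
--     # incremental min-squared-distance to the selected set; -1 marks selected slots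
--     mind = [(x_coords[i] - x_coords[last]) ** 2 + (y_coords[i] - y_coords[last]) ** 2
--             for i in range(n)]
--     mind[last] = -1
--     thr = min_distance ** 2
--     while len(selected) < num_points:
--         best_val = -1
--         best_idx = -1
--         for i, d in enumerate(mind):
--             if d > best_val:
--                 best_val = d
--                 best_idx = i
--         if best_val < thr:
--             break
--         selected.append(best_idx)
--         for i in range(n):
--             d = (x_coords[i] - x_coords[best_idx]) ** 2 + (y_coords[i] - y_coords[best_idx]) ** 2
--             if d < mind[i]:
--                 mind[i] = d
--         mind[best_idx] = -1
--     return selected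
-- ===== Notes on version B (the rewrite author's own statement) =====
-- stated objective: faster
-- what changed: B maintains an incremental array of each point's min squared distance to the selected set, updated only against the newest selected point each round, instead of A recomputing distances to every selected point for every candidate every round.
-- outside the precondition, e.g. on _select_diverse_points([1, 2, 3], [0], 1, 0): A returns [2], B raises IndexError; on _select_diverse_points([], [], -1, 0): A returns [-1], B raises IndexError
import Mathlib
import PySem

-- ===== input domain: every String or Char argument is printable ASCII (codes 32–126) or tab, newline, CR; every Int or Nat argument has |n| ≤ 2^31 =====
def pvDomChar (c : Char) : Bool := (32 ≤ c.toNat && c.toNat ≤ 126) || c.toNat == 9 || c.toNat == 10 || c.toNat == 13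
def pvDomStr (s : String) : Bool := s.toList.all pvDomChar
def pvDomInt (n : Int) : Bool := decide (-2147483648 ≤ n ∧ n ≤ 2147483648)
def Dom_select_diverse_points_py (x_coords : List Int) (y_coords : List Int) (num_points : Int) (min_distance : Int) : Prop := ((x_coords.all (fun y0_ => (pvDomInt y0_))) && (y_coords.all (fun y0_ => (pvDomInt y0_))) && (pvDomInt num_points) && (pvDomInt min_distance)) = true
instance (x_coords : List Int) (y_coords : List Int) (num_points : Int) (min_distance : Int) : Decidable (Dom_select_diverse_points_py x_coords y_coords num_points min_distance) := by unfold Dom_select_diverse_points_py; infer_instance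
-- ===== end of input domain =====

-- B replaces A's recomputation of every point's min-distance to ALL selected points each round
-- by an incrementally maintained min-distance array updated only against the newest selected
-- point (O(n·k) instead of O(n·k²)); same selections, same order.

-- ===== PORT A =====
-- squared distance between points i and j (the arithmetic both sources write inline)
def pvD2 (x y : List Int) (i j : Int) : Int :=
  (PySem.List.pyGetD x i 0 - PySem.List.pyGetD x j 0) ^ 2 +
  (PySem.List.pyGetD y i 0 - PySem.List.pyGetD y j 0) ^ 2

-- A's 'dists = [...]; min_dist = min(dists)'
def pvMinD (x y : List Int) (i : Int) (sel : List Int) : Int :=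
  let dists := sel.map (fun j => pvD2 x y i j)
  (PySem.List.min? dists (fun v => v)).getD 0

-- one pass of A's inner 'for i in range(len(x_coords))': (max_min_dist, best_idx)
def pvAStep (x y : List Int) (sel : List Int) : Int × Option Int :=
  (PySem.List.pyRange 0 (x.length : Int) 1).foldl
    (fun acc i =>
      if i ∈ sel then acc
      else
        let min_dist := pvMinD x y i sel
        if min_dist > acc.1 then (min_dist, some i) else acc)
    (-1, none)

-- A's 'while len(selected_indices) < num_points' (fuel x.length: the list grows each pass)
def pvALoop (x y : List Int) (np md : Int) : Nat → List Int → List Int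
  | 0, sel => sel
  | fuel + 1, sel =>
    if (sel.length : Int) < np then
      let s := pvAStep x y sel
      match s.2 with
      | some b => if s.1 ≥ md ^ 2 then pvALoop x y np md fuel (sel ++ [b]) else sel
      | none => sel
    else sel

def select_diverse_points_py (x_coords : List Int) (y_coords : List Int) (num_points : Int) (min_distance : Int) : List Int :=
  if (x_coords.length : Int) ≤ num_points then
    PySem.List.pyRange 0 (x_coords.length : Int) 1
  else
    pvALoop x_coords y_coords num_points min_distance x_coords.length
      [(x_coords.length : Int) - 1]

-- ===== PORT B =====
-- B's argmax scan 'for i, d in enumerate(mind)': (best_val, best_idx)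
def pvBArgmax (mind : List Int) : Int × Int :=
  (PySem.List.enumerate mind).foldl
    (fun acc p => if p.2 > acc.1 then (p.2, p.1) else acc) (-1, -1)

-- B's in-place update 'if d < mind[i]: mind[i] = d' against the newest selected point b
def pvBUpdate (x y mind : List Int) (b : Int) : List Int :=
  (PySem.List.enumerate mind).map
    (fun p => if pvD2 x y p.1 b < p.2 then pvD2 x y p.1 b else p.2)

-- B's 'while len(selected) < num_points' over (selected, mind)
def pvBLoop (x y : List Int) (np md : Int) : Nat → List Int → List Int → List Int
  | 0, sel, _ => sel
  | fuel + 1, sel, mind =>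
    if (sel.length : Int) < np then
      let bm := pvBArgmax mind
      if bm.1 < md ^ 2 then sel
      else pvBLoop x y np md fuel (sel ++ [bm.2])
        (PySem.List.pySetD (pvBUpdate x y mind bm.2) bm.2 (-1))
    else sel

def select_diverse_points_py_alt (x_coords : List Int) (y_coords : List Int) (num_points : Int) (min_distance : Int) : List Int :=
  if (x_coords.length : Int) ≤ num_points then
    PySem.List.pyRange 0 (x_coords.length : Int) 1
  else
    let last := (x_coords.length : Int) - 1
    let mind0 := (PySem.List.pyRange 0 (x_coords.length : Int) 1).map
      (fun i => pvD2 x_coords y_coords i last)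
    pvBLoop x_coords y_coords num_points min_distance x_coords.length [last]
      (PySem.List.pySetD mind0 last (-1))

-- ===== PRECONDITION & SPEC =====
-- Pre_ excludes inputs on which a program raises IndexError: (a) y_coords shorter than x_coords
-- while points are actually selected — A raises there when 2 ≤ num_points < len(x_coords), and B,
-- which builds its distance cache up front, raises there already for num_points ≤ 1 while A still
-- returns [len-1]; (b) empty x_coords with negative num_points, where A returns the accidental
-- [-1] and B raises while filling the empty cache.
def Pre_select_diverse_points_py (x_coords : List Int) (y_coords : List Int) (num_points : Int) (min_distance : Int) : Prop :=
  ((x_coords.length : Int) ≤ num_points) ∨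
  (x_coords.length ≤ y_coords.length ∧ x_coords ≠ [])
instance (x_coords : List Int) (y_coords : List Int) (num_points : Int) (min_distance : Int) : Decidable (Pre_select_diverse_points_py x_coords y_coords num_points min_distance) := by unfold Pre_select_diverse_points_py; infer_instance

def pvWitness_select_diverse_points_py : List Int × List Int × Int × Int :=
  ([0, 5, 9], [0, 0, 0], 2, 2)

def Spec_select_diverse_points_py (x_coords : List Int) (y_coords : List Int) (num_points : Int) (min_distance : Int) (out : List Int) : Prop := out = select_diverse_points_py_alt x_coords y_coords num_points min_distance
instance (x_coords : List Int) (y_coords : List Int) (num_points : Int) (min_distance : Int) (out : List Int) : Decidable (Spec_select_diverse_points_py x_coords y_coords num_points min_distance out) := by unfold Spec_select_diverse_points_py; infer_instance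

-- ===== CLAIM (what is proved, stated in full; the proofs are below) =====
def Claim_equal_select_diverse_points_py : Prop := ∀ (x_coords : List Int) (y_coords : List Int) (num_points : Int) (min_distance : Int), Dom_select_diverse_points_py x_coords y_coords num_points min_distance → Pre_select_diverse_points_py x_coords y_coords num_points min_distance → Spec_select_diverse_points_py x_coords y_coords num_points min_distance (select_diverse_points_py x_coords y_coords num_points min_distance)

-- ===== LEMMAS AND PROOFS =====

-- the min-distance cache B maintains, expressed as a function of A's selected list
def pvMindOf (x y sel : List Int) : List Int :=
  (PySem.List.pyRange 0 (x.length : Int) 1).map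
    (fun i => if i ∈ sel then (-1 : Int) else pvMinD x y i sel)

-- the two inner-loop step functions, named so the fold lemmas can talk about them
def pvFA (x y sel : List Int) : (Int × Option Int) → Int → (Int × Option Int) :=
  fun acc i =>
    if i ∈ sel then acc
    else
      let min_dist := pvMinD x y i sel
      if min_dist > acc.1 then (min_dist, some i) else acc

def pvFB (x y sel : List Int) : (Int × Int) → Int → (Int × Int) :=
  fun acc i =>
    let v := if i ∈ sel then (-1 : Int) else pvMinD x y i sel
    if v > acc.1 then (v, i) else acc

theorem pvD2_nonneg (x y : List Int) (i j : Int) : 0 ≤ pvD2 x y i j :=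
  add_nonneg (sq_nonneg _) (sq_nonneg _)

theorem pvMinD_nonneg (x y : List Int) (i : Int) (sel : List Int) (hne : sel ≠ []) :
    0 ≤ pvMinD x y i sel := by
  obtain ⟨s0, rest, rfl⟩ := List.exists_cons_of_ne_nil hne
  simp only [pvMinD, List.map_cons, PySem.List.min?_id_cons, Option.getD_some]
  rcases PySem.List.foldl_min_mem (rest.map (fun j => pvD2 x y i j)) (pvD2 x y i s0) with h | h
  · rw [h]; exact pvD2_nonneg _ _ _ _
  · obtain ⟨j, _, hj⟩ := List.mem_map.mp h
    rw [← hj]; exact pvD2_nonneg _ _ _ _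

theorem pvMinD_append (x y : List Int) (i : Int) (sel : List Int) (hne : sel ≠ []) (b : Int) :
    pvMinD x y i (sel ++ [b]) =
      if pvD2 x y i b < pvMinD x y i sel then pvD2 x y i b else pvMinD x y i sel := by
  obtain ⟨s0, rest, rfl⟩ := List.exists_cons_of_ne_nil hne
  simp only [pvMinD, List.cons_append, List.map_cons, List.map_append, List.map_cons,
    List.map_nil, PySem.List.min?_id_cons, Option.getD_some, List.foldl_append, List.foldl_cons,
    List.foldl_nil]
  rcases le_or_gt (List.foldl min (pvD2 x y i s0) (rest.map (fun j => pvD2 x y i j)))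
      (pvD2 x y i b) with h | h
  · rw [min_eq_left h, if_neg (by omega)]
  · rw [min_eq_right (le_of_lt h), if_pos h]

theorem pvMindOf_length (x y sel : List Int) : (pvMindOf x y sel).length = x.length := by
  simp [pvMindOf, PySem.List.length_pyRange_one]

theorem pvMindOf_getElem (x y sel : List Int) (k : Nat) (_hk : k < x.length)
    (h : k < (pvMindOf x y sel).length) :
    (pvMindOf x y sel)[k] = if (k : Int) ∈ sel then (-1 : Int) else pvMinD x y k sel := by
  simp only [pvMindOf, List.getElem_map, PySem.List.getElem_pyRange_one]
  norm_num

-- accumulator correspondence between A's scan (skips selected i) and B's scan (reads -1 there)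
theorem pvFoldRel (x y sel : List Int) (hne : sel ≠ []) (l : List Int)
    (a : Int × Option Int) (b : Int × Int)
    (h1 : a.1 = b.1) (h2 : -1 ≤ a.1)
    (h3 : a.2 = none → a.1 = -1)
    (h4 : ∀ v, a.2 = some v → b.2 = v ∧ v ∉ sel) :
    (l.foldl (pvFA x y sel) a).1 = (l.foldl (pvFB x y sel) b).1
    ∧ -1 ≤ (l.foldl (pvFA x y sel) a).1
    ∧ ((l.foldl (pvFA x y sel) a).2 = none → (l.foldl (pvFA x y sel) a).1 = -1)
    ∧ ∀ v, (l.foldl (pvFA x y sel) a).2 = some v →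
        (l.foldl (pvFB x y sel) b).2 = v ∧ v ∉ sel ∧ (v ∈ l ∨ a.2 = some v) := by
  induction l generalizing a b with
  | nil =>
    simp only [List.foldl_nil]
    exact ⟨h1, h2, h3, fun v hv => ⟨(h4 v hv).1, (h4 v hv).2, Or.inr hv⟩⟩
  | cons i t ih =>
    simp only [List.foldl_cons]
    by_cases hi : i ∈ sel
    · have hA : pvFA x y sel a i = a := by simp [pvFA, hi]
      have hB : pvFB x y sel b i = b := by
        simp only [pvFB, if_pos hi]
        rw [if_neg (by omega)]
      rw [hA, hB]
      obtain ⟨c1, c2, c3, c4⟩ := ih a b h1 h2 h3 h4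
      exact ⟨c1, c2, c3, fun v hv => by
        obtain ⟨d1, d2, d3⟩ := c4 v hv
        exact ⟨d1, d2, d3.imp (List.mem_cons_of_mem i) id⟩⟩
    · have hm0 : 0 ≤ pvMinD x y i sel := pvMinD_nonneg x y i sel hne
      by_cases hgt : pvMinD x y i sel > a.1
      · have hA : pvFA x y sel a i = (pvMinD x y i sel, some i) := by
          simp [pvFA, hi, hgt]
        have hB : pvFB x y sel b i = (pvMinD x y i sel, i) := by
          simp only [pvFB, if_neg hi]
          rw [if_pos (h1 ▸ hgt)]
        rw [hA, hB]
        obtain ⟨c1, c2, c3, c4⟩ := ih (pvMinD x y i sel, some i) (pvMinD x y i sel, i)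
          rfl (by simpa using by omega) (by simp) (by
            intro v hv
            simp only [Option.some_inj] at hv
            exact ⟨hv.symm ▸ rfl, hv ▸ hi⟩)
        refine ⟨c1, c2, c3, fun v hv => ?_⟩
        obtain ⟨d1, d2, d3⟩ := c4 v hv
        refine ⟨d1, d2, ?_⟩
        rcases d3 with h | h
        · exact Or.inl (List.mem_cons_of_mem i h)
        · simp only [Option.some_inj] at h
          exact Or.inl (h ▸ List.mem_cons_self)
      · have hA : pvFA x y sel a i = a := by simp [pvFA, hi, hgt]
        have hB : pvFB x y sel b i = b := by
          simp only [pvFB, if_neg hi]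
          rw [if_neg (h1 ▸ hgt)]
        rw [hA, hB]
        obtain ⟨c1, c2, c3, c4⟩ := ih a b h1 h2 h3 h4
        exact ⟨c1, c2, c3, fun v hv => by
          obtain ⟨d1, d2, d3⟩ := c4 v hv
          exact ⟨d1, d2, d3.imp (List.mem_cons_of_mem i) id⟩⟩

theorem pvBArgmax_mindOf (x y sel : List Int) :
    pvBArgmax (pvMindOf x y sel) =
      (PySem.List.pyRange 0 (x.length : Int) 1).foldl (pvFB x y sel) (-1, -1) := by
  unfold pvBArgmax
  rw [PySem.List.enumerate_eq_map_pyRange (pvMindOf x y sel) 0]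
  have hlen : PySem.List.len (pvMindOf x y sel) = (x.length : Int) := by
    simp [pvMindOf, PySem.List.length_pyRange_one]
  rw [hlen, List.foldl_map]
  apply PySem.List.foldl_congr_mem
  intro acc i hi
  obtain ⟨hi0, hin⟩ := PySem.List.mem_pyRange_one.mp hi
  simp only [pvMindOf]
  rw [PySem.List.pyGetD_map_pyRange_of_nonneg _ _ _ _ hi0 hin]
  rfl

theorem pvStep_corr (x y sel : List Int) (hne : sel ≠ []) :
    (pvAStep x y sel).1 = (pvBArgmax (pvMindOf x y sel)).1
    ∧ ((pvAStep x y sel).2 = none → (pvAStep x y sel).1 = -1)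
    ∧ ∀ v, (pvAStep x y sel).2 = some v →
        (pvBArgmax (pvMindOf x y sel)).2 = v ∧ v ∉ sel ∧ 0 ≤ v ∧ v < (x.length : Int) := by
  have hA : pvAStep x y sel =
      (PySem.List.pyRange 0 (x.length : Int) 1).foldl (pvFA x y sel) (-1, none) := rfl
  rw [hA, pvBArgmax_mindOf]
  obtain ⟨c1, c2, c3, c4⟩ := pvFoldRel x y sel hne (PySem.List.pyRange 0 (x.length : Int) 1)
    (-1, none) (-1, -1) rfl (by norm_num) (fun _ => rfl) (by simp)
  refine ⟨c1, c3, fun v hv => ?_⟩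
  obtain ⟨d1, d2, d3⟩ := c4 v hv
  rcases d3 with h | h
  · obtain ⟨h0, hn⟩ := PySem.List.mem_pyRange_one.mp h
    exact ⟨d1, d2, h0, hn⟩
  · simp at h

-- B's pointwise update against the newest point b turns the cache for sel into the one for sel ++ [b]
theorem pvUpdate_mindOf (x y sel : List Int) (hne : sel ≠ []) (b : Int)
    (hb0 : 0 ≤ b) (_hbn : b < (x.length : Int)) (_hbs : b ∉ sel) :
    PySem.List.pySetD (pvBUpdate x y (pvMindOf x y sel) b) b (-1) =
      pvMindOf x y (sel ++ [b]) := by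
  rw [PySem.List.pySetD_of_nonneg _ _ hb0]
  apply List.ext_getElem
  · simp [pvBUpdate, pvMindOf, PySem.List.length_enumerate, PySem.List.length_pyRange_one]
  · intro k h1 h2
    have hkx : k < x.length := by
      simpa [pvBUpdate, PySem.List.length_enumerate, pvMindOf_length] using h1
    rw [List.getElem_set]
    have hup : (pvBUpdate x y (pvMindOf x y sel) b)[k]'(by
        simpa [pvBUpdate, PySem.List.length_enumerate, pvMindOf_length] using hkx) =
        if pvD2 x y k b < (pvMindOf x y sel)[k]'(by simpa [pvMindOf_length] using hkx)
        then pvD2 x y k b else (pvMindOf x y sel)[k]'(by simpa [pvMindOf_length] using hkx) := by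
      simp only [pvBUpdate, List.getElem_map, PySem.List.getElem_enumerate]
      norm_num
    rw [pvMindOf_getElem x y (sel ++ [b]) k hkx h2]
    by_cases hkb : b.toNat = k
    · rw [if_pos hkb]
      have : (k : Int) = b := by omega
      rw [if_pos (by simp [this])]
    · rw [if_neg hkb, hup, pvMindOf_getElem x y sel k hkx]
      have hkneb : (k : Int) ≠ b := by omega
      by_cases hks : (k : Int) ∈ sel
      · have hmem : (k : Int) ∈ sel ++ [b] := List.mem_append.mpr (Or.inl hks)
        rw [if_pos hks, if_pos hmem, if_neg (by have := pvD2_nonneg x y (k : Int) b; omega)]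
      · have hmem : (k : Int) ∉ sel ++ [b] := by simp [hks, hkneb]
        rw [if_neg hks, if_neg hmem, pvMinD_append x y k sel hne b]

-- B's initial comprehension plus 'mind[last] = -1' is the cache for the initial selection [last]
theorem pvInit_mindOf (x y : List Int) (hx : x ≠ []) :
    PySem.List.pySetD
        ((PySem.List.pyRange 0 (x.length : Int) 1).map
          (fun i => pvD2 x y i ((x.length : Int) - 1)))
        ((x.length : Int) - 1) (-1)
      = pvMindOf x y [(x.length : Int) - 1] := by
  have hn1 : 1 ≤ (x.length : Int) := by have := List.length_pos_of_ne_nil hx; omega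
  rw [PySem.List.pySetD_of_nonneg _ _ (by omega)]
  apply List.ext_getElem
  · simp [pvMindOf, PySem.List.length_pyRange_one]
  · intro k h1 h2
    have hkx : k < x.length := by
      simpa [PySem.List.length_pyRange_one] using h1
    rw [List.getElem_set, pvMindOf_getElem x y _ k hkx h2]
    by_cases hkb : ((x.length : Int) - 1).toNat = k
    · rw [if_pos hkb, if_pos (by simp; omega)]
    · rw [if_neg hkb, if_neg (by simp; omega)]
      simp only [List.getElem_map, PySem.List.getElem_pyRange_one]
      simp [pvMinD, PySem.List.min?_id_cons]

-- the two while-loops agree, carrying 'mind is the cache for sel' as the invariant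
theorem pvLoop_eq (x y : List Int) (np md : Int) (fuel : Nat) :
    ∀ sel : List Int, sel ≠ [] → (∀ j ∈ sel, 0 ≤ j ∧ j < (x.length : Int)) →
      pvALoop x y np md fuel sel = pvBLoop x y np md fuel sel (pvMindOf x y sel) := by
  induction fuel with
  | zero => intro sel _ _; rfl
  | succ fuel ih =>
    intro sel hne hrange
    simp only [pvALoop, pvBLoop]
    by_cases hlt : (sel.length : Int) < np
    · rw [if_pos hlt, if_pos hlt]
      obtain ⟨c1, c3, c4⟩ := pvStep_corr x y sel hne
      have hmd : 0 ≤ md ^ 2 := sq_nonneg md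
      cases hs : (pvAStep x y sel).2 with
      | none =>
        have hb1 : (pvBArgmax (pvMindOf x y sel)).1 = -1 := by rw [← c1]; exact c3 hs
        rw [if_pos (by omega)]
      | some v =>
        dsimp only
        obtain ⟨d1, d2, d3, d4⟩ := c4 v hs
        by_cases hge : (pvAStep x y sel).1 ≥ md ^ 2
        · rw [if_pos hge, if_neg (by omega)]
          rw [d1, pvUpdate_mindOf x y sel hne v d3 d4 d2]
          exact ih (sel ++ [v]) (by simp) (by
            intro j hj
            rcases List.mem_append.mp hj with h | h
            · exact hrange j h
            · simp at h; omega)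
        · rw [if_neg hge, if_pos (by omega)]
    · rw [if_neg hlt, if_neg hlt]

-- ===== VERDICT (by name: the statement is the Claim_ definition above) =====
theorem select_diverse_points_py_spec : Claim_equal_select_diverse_points_py := by
  intro x y np md hDom hPre
  unfold Spec_select_diverse_points_py
  by_cases hif : (x.length : Int) ≤ np
  · simp [select_diverse_points_py, select_diverse_points_py_alt, hif]
  · have hx : x ≠ [] := by
      rcases hPre with h | ⟨_, hx⟩
      · exact absurd h hif
      · exact hx
    have hn1 : 1 ≤ (x.length : Int) := by
      have := List.length_pos_of_ne_nil hx; omega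
    simp only [select_diverse_points_py, select_diverse_points_py_alt, if_neg hif]
    rw [pvInit_mindOf x y hx]
    exact pvLoop_eq x y np md x.length [(x.length : Int) - 1] (by simp)
      (by intro j hj; simp at hj; omega)
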